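-- pv_equiv track=rewrite | github.com/jdanray/leetcode | mirrorDistance.py | mirrorDistance
-- ===== SOURCE A (Python) =====
-- def mirrorDistance(n):
-- 	def reverse(n):
-- 		r = 0
-- 		while n > 0:
-- 			r *= 10
-- 			r += n % 10
-- 			n //= 10
-- 		return r
--
-- 	return abs(n - reverse(n))
-- ===== SOURCE B (Python) =====
-- def mirrorDistance(n):
-- 	rev, p = 0, 1
-- 	if n > 0:
-- 		for c in str(n):
-- 			rev += (ord(c) - ord("0")) * p
-- 			p *= 10
-- 	return abs(n - rev)
-- ===== Notes on version B (the rewrite author's own statement) =====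
-- stated objective: alternative
-- what changed: Replaces the arithmetic modulo/floor-division peeling loop with a single left-to-right pass over the decimal string of n, accumulating the reversed value positionally with a running power of ten.
import Mathlib
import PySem

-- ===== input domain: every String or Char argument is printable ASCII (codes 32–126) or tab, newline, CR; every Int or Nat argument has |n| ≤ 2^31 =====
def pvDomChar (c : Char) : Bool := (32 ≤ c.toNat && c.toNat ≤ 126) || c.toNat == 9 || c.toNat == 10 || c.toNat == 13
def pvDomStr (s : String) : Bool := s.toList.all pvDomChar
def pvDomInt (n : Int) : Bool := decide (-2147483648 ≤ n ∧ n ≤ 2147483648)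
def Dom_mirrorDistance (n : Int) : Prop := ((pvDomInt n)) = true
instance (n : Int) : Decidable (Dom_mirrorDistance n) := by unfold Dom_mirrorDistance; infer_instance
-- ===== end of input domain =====

-- B replaces A's modulo/floor-division digit-peeling loop by one forward pass over the
-- decimal string of n with a running power of ten (alternative decomposition, same cost).

-- ===== PORT A =====
-- the inner 'while n > 0: r *= 10; r += n % 10; n //= 10' loop of reverse(n)
def pyRevLoop (n r : Int) : Int :=
  if h : 0 < n then
    pyRevLoop (PySem.Int.floordiv n 10) (r * 10 + PySem.Int.mod n 10)
  else r
termination_by n.toNat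
decreasing_by
  rw [PySem.Int.floordiv_eq_ediv_of_pos (by norm_num)]
  omega

def mirrorDistance (n : Int) : Int := |n - pyRevLoop n 0|

-- ===== PORT B =====
def mirrorDistance_alt (n : Int) : Int :=
  let rp : Int × Int :=
    if 0 < n then
      -- for c in str(n): rev += (ord(c) - ord("0")) * p; p *= 10
      (PySem.Int.toChars n).foldl
        (fun (s : Int × Int) c => (s.1 + ((c.toNat : Int) - 48) * s.2, s.2 * 10)) (0, 1)
    else (0, 1)
  |n - rp.1|

-- ===== PRECONDITION & SPEC =====
def Spec_mirrorDistance (n : Int) (out : Int) : Prop := out = mirrorDistance_alt n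
instance (n : Int) (out : Int) : Decidable (Spec_mirrorDistance n out) := by unfold Spec_mirrorDistance; infer_instance

-- ===== CLAIM (what is proved, stated in full; the proofs are below) =====
def Claim_equal_mirrorDistance : Prop := ∀ (n : Int), Dom_mirrorDistance n → Spec_mirrorDistance n (mirrorDistance n)

-- ===== LEMMAS AND PROOFS =====

-- A's loop on a natural number computes the reversed-digit value positionally
theorem pyRevLoop_eq (m : Nat) : ∀ r : Int,
    pyRevLoop (m : Int) r
      = r * 10 ^ (Nat.digits 10 m).length + ((Nat.ofDigits 10 ((Nat.digits 10 m).reverse) : Nat) : Int) := by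
  induction m using Nat.strong_induction_on with
  | _ m ih =>
    intro r
    rcases Nat.eq_zero_or_pos m with hm | hm
    · subst hm
      rw [pyRevLoop]
      simp
    · rw [pyRevLoop]
      rw [dif_pos (by exact_mod_cast hm)]
      have hfd : PySem.Int.floordiv (m : Int) 10 = ((m / 10 : Nat) : Int) := by
        exact_mod_cast PySem.Int.floordiv_natCast m 10
      have hmd : PySem.Int.mod (m : Int) 10 = ((m % 10 : Nat) : Int) := by
        exact_mod_cast PySem.Int.mod_natCast m 10
      rw [hfd, hmd, ih (m / 10) (Nat.div_lt_self hm (by norm_num)) _]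
      rw [Nat.digits_def' (by norm_num : 1 < 10) hm]
      simp only [List.reverse_cons, List.length_cons, Nat.ofDigits_append,
        List.length_reverse, Nat.ofDigits_cons, Nat.ofDigits_nil]
      push_cast
      ring

-- toDigitsCore with enough fuel emits the big-endian digits
theorem toDigitsCore_eq (f : Nat) : ∀ (m : Nat) (acc : List Char), 0 < m → m < f →
    Nat.toDigitsCore 10 f m acc
      = ((Nat.digits 10 m).reverse.map Nat.digitChar) ++ acc := by
  induction f with
  | zero => intro m acc h hf; omega
  | succ f ih =>
    intro m acc hm hf
    rw [Nat.toDigitsCore]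
    rw [Nat.digits_def' (by norm_num : 1 < 10) hm]
    simp only [List.reverse_cons, List.map_append, List.map_cons, List.map_nil]
    by_cases h0 : m / 10 = 0
    · simp [h0, Nat.digits_zero]
    · rw [if_neg h0]
      rw [ih (m / 10) _ (Nat.pos_of_ne_zero h0) (by omega)]
      simp

theorem toDigits_eq (m : Nat) (hm : 0 < m) :
    Nat.toDigits 10 m = (Nat.digits 10 m).reverse.map Nat.digitChar := by
  rw [Nat.toDigits]
  simpa using toDigitsCore_eq (m + 1) m [] hm (by omega)

theorem digitChar_toNat (d : Nat) (hd : d < 10) : ((Nat.digitChar d).toNat : Int) - 48 = (d : Int) := by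
  interval_cases d <;> decide

-- B's fold over big-endian digit characters
theorem foldl_digits (l : List Nat) (hl : ∀ d ∈ l, d < 10) : ∀ r p : Int,
    (l.map Nat.digitChar).foldl
        (fun (s : Int × Int) c => (s.1 + ((c.toNat : Int) - 48) * s.2, s.2 * 10)) (r, p)
      = (r + p * ((Nat.ofDigits 10 l : Nat) : Int), p * 10 ^ l.length) := by
  induction l with
  | nil => intro r p; simp [Nat.ofDigits]
  | cons d t ih =>
    intro r p
    simp only [List.map_cons, List.foldl_cons]
    rw [digitChar_toNat d (hl d (List.mem_cons_self))]
    rw [ih (fun x hx => hl x (List.mem_cons_of_mem _ hx))]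
    rw [Nat.ofDigits_cons]
    push_cast
    refine Prod.ext ?_ ?_ <;> simp <;> ring

theorem mirrorDistance_eq_alt (n : Int) : mirrorDistance n = mirrorDistance_alt n := by
  unfold mirrorDistance mirrorDistance_alt
  by_cases hn : 0 < n
  · rw [if_pos hn]
    have hm : n = ((n.toNat : Nat) : Int) := by omega
    have hmpos : 0 < n.toNat := by omega
    rw [PySem.Int.toChars, if_neg (by omega)]
    rw [toDigits_eq n.toNat hmpos]
    rw [foldl_digits _ (fun d hd => Nat.digits_lt_base (by norm_num) (List.mem_reverse.mp hd))]
    conv_lhs => rw [hm, pyRevLoop_eq]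
    simp
    rw [max_eq_left hn.le]
  · rw [if_neg hn]
    rw [pyRevLoop, dif_neg hn]

-- ===== VERDICT (by name: the statement is the Claim_ definition above) =====
theorem mirrorDistance_spec : Claim_equal_mirrorDistance := by
  intro n _
  show mirrorDistance n = mirrorDistance_alt n
  exact mirrorDistance_eq_alt n
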